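-- pv_equiv track=rewrite | github.com/Mustafa00124/Zero_Shot_Semantic_Matching-for-PSL | cnn_lstm_baseline.py | _remap_subset
-- ===== SOURCE A (Python) =====
-- def _remap_subset(samples):
--     mapping = {}
--     next_id = 0
--     remapped = []
--     for path, y in samples:
--         if y not in mapping:
--             mapping[y] = next_id
--             next_id += 1
--         remapped.append((path, mapping[y]))
--     return remapped, next_id
-- ===== SOURCE B (Python) =====
-- def _remap_subset(samples):
--     # Different algorithm: instead of a running counter, record each label's
--     # FIRST-OCCURRENCE INDEX, then derive the dense id of a label as the RANK of
--     # that index among all first-occurrence indices (rank-by-sort).  Correct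
--     # because first-occurrence indices are assigned in first-occurrence order,
--     # so their ranks are exactly the consecutive ids A hands out.
--     first = {}
--     for i, (_, y) in enumerate(samples):
--         first.setdefault(y, i)
--     ranks = {pos: r for r, pos in enumerate(sorted(first.values()))}
--     return [(p, ranks[first[y]]) for p, y in samples], len(ranks)
-- ===== Notes on version B (the rewrite author's own statement) =====
-- stated objective: alternative
-- what changed: A hands out ids from a running counter fused with the output loop; B records each label's first-occurrence index with setdefault, sorts those indices and assigns each label the RANK of its index (rank-by-sort), then remaps through the finished rank table.
import Mathlib
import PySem

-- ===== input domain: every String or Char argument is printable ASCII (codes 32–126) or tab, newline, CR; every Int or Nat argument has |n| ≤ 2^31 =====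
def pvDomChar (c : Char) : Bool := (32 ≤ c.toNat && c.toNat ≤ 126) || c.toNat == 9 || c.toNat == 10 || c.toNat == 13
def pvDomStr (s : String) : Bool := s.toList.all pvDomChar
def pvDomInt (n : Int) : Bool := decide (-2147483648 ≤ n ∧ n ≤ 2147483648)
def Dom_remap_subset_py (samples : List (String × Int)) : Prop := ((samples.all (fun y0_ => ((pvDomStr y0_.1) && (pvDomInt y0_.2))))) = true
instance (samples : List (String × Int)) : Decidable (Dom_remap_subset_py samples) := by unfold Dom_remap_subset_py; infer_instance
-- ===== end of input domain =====

-- B replaces A's fused counter loop by rank-by-sort: record first-occurrence indices, sort them, and map each label to its index's rank; same results, stated as Claim_equal below.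


-- ===== PORT A =====
-- A's single loop: dict `mapping`, counter `next_id`, accumulator `remapped`.
-- `mapping[y]` on the append line is a lookup of a key that is certainly present
-- (it was just inserted in the not-in branch), so `getD … 0` is exact here.
def remapALoop (m : PySem.Dict Int Int) (next_id : Int) (remapped : List (String × Int)) :
    List (String × Int) → (List (String × Int)) × Int
  | [] => (remapped, next_id)
  | (path, y) :: rest =>
    if m.contains y then
      remapALoop m next_id (remapped ++ [(path, m.getD y 0)]) rest
    else
      remapALoop (m.insert y next_id) (next_id + 1)
        (remapped ++ [(path, (m.insert y next_id).getD y 0)]) rest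

def remap_subset_py (samples : List (String × Int)) : (List (String × Int)) × Int :=
  remapALoop PySem.Dict.empty 0 [] samples

-- ===== PORT B =====
-- for i, (_, y) in enumerate(samples): first.setdefault(y, i)
def firstOcc (samples : List (String × Int)) : PySem.Dict Int Int :=
  (PySem.List.enumerate samples 0).foldl (fun d ip => d.setdefault ip.2.2 ip.1) PySem.Dict.empty

-- ranks = {pos: r for r, pos in enumerate(sorted(first.values()))}
def mkRanks (positions : List Int) : PySem.Dict Int Int :=
  (PySem.List.enumerate (PySem.List.sorted positions (fun x => x) false) 0).foldl
    (fun d rp => d.insert rp.2 rp.1) PySem.Dict.empty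

-- `first[y]` and `ranks[…]` in the comprehension look up keys that are always present; getD … 0 is exact.
def remap_subset_py_alt (samples : List (String × Int)) : (List (String × Int)) × Int :=
  let first := firstOcc samples
  let ranks := mkRanks first.values
  (samples.map (fun py => (py.1, ranks.getD (first.getD py.2 0) 0)), (ranks.size : Int))

-- ===== PRECONDITION & SPEC =====
def Spec_remap_subset_py (samples : List (String × Int)) (out : (List (String × Int)) × Int) : Prop := out = remap_subset_py_alt samples
instance (samples : List (String × Int)) (out : (List (String × Int)) × Int) : Decidable (Spec_remap_subset_py samples out) := by unfold Spec_remap_subset_py; infer_instance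

-- ===== CLAIM (what is proved, stated in full; the proofs are below) =====
def Claim_equal_remap_subset_py : Prop := ∀ (samples : List (String × Int)), Dom_remap_subset_py samples → Spec_remap_subset_py samples (remap_subset_py samples)

-- ===== LEMMAS AND PROOFS =====

lemma idxOf_append_self (ds : List Int) (y : Int) (h : y ∉ ds) :
    (ds ++ [y]).idxOf y = ds.length := by
  induction ds with
  | nil => simp
  | cons a t ih =>
    simp only [List.mem_cons, not_or] at h
    rw [List.cons_append, List.idxOf_cons_ne _ (by simpa using (Ne.symm h.1)), ih h.2,
      List.length_cons]

lemma idxOf_update (l ds : List Int) (y : Int) (h : y ∈ ds) :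
    (PySem.Set.update ds l).idxOf y = ds.idxOf y := by
  induction l generalizing ds with
  | nil => rw [PySem.Set.update_nil]
  | cons a t ih =>
    rw [PySem.Set.update_cons, PySem.Set.add_eq_ite]
    split
    · exact ih ds h
    · rw [ih _ (by simp [h]), List.idxOf_append_of_mem h]

-- characterisation of A's loop (idxOf in first-occurrence order)
lemma remapALoop_spec :
    ∀ (rest : List (String × Int)) (ds : List Int) (m : PySem.Dict Int Int)
      (acc : List (String × Int)),
      (∀ z, m.get? z = if z ∈ ds then some ((ds.idxOf z : Int)) else none) →
      remapALoop m (ds.length : Int) acc rest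
        = (acc ++ rest.map (fun py =>
              (py.1, ((PySem.Set.update ds (rest.map Prod.snd)).idxOf py.2 : Int))),
           ((PySem.Set.update ds (rest.map Prod.snd)).length : Int)) := by
  intro rest
  induction rest with
  | nil => intro ds m acc _; simp [remapALoop, PySem.Set.update_nil]
  | cons hd tl ih =>
    intro ds m acc hm
    obtain ⟨path, y⟩ := hd
    have hcont : m.contains y = decide (y ∈ ds) := by
      rw [PySem.Dict.contains_eq_isSome_get?, hm y]
      by_cases hy : y ∈ ds <;> simp [hy]
    by_cases hy : y ∈ ds
    · have hget : m.getD y 0 = (ds.idxOf y : Int) := by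
        rw [PySem.Dict.getD_eq_get?_getD, hm y]; simp [hy]
      rw [remapALoop, hcont]
      simp only [hy, decide_true, if_true, hget]
      rw [ih ds m _ hm]
      simp only [List.map_cons, PySem.Set.update_cons, PySem.Set.add_of_mem hy]
      rw [idxOf_update _ _ _ hy, List.append_assoc]
      rfl
    · have hm' : ∀ z, (m.insert y (ds.length : Int)).get? z
          = if z ∈ ds ++ [y] then some (((ds ++ [y]).idxOf z : Int)) else none := by
        intro z
        rw [PySem.Dict.get?_insert]
        by_cases hz : z = y
        · subst hz; simp [idxOf_append_self ds z hy]
        · rw [hm z]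
          by_cases hzd : z ∈ ds
          · simp [hz, hzd, List.idxOf_append_of_mem hzd]
          · simp [hz, hzd]
      have hlen : (ds.length : Int) + 1 = ((ds ++ [y]).length : Int) := by
        simp
      rw [remapALoop, hcont]
      simp only [hy, decide_false]
      rw [PySem.Dict.getD_insert_self, hlen, ih (ds ++ [y]) _ _ hm']
      have hymem : y ∈ ds ++ [y] := by simp
      simp only [List.map_cons, PySem.Set.update_cons, PySem.Set.add_of_not_mem hy]
      rw [idxOf_update _ _ _ hymem, idxOf_append_self ds y hy, List.append_assoc]
      rfl

-- lookup characterisation of B's rank-dict comprehension (enumerate + insert)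
lemma mkRanks_get? (ds : List Int) (y : Int) :
    ∀ (s : Int) (d : PySem.Dict Int Int), ds.Nodup →
      ((PySem.List.enumerate ds s).foldl (fun d iy => d.insert iy.2 iy.1) d).get? y
        = if y ∈ ds then some (s + (ds.idxOf y : Int)) else d.get? y := by
  induction ds with
  | nil => intro s d _; simp [PySem.List.enumerate_nil]
  | cons a t ih =>
    intro s d hnd
    rw [PySem.List.enumerate_cons]
    simp only [List.foldl_cons]
    rw [ih (s + 1) _ (List.nodup_cons.mp hnd).2]
    by_cases hy : y = a
    · subst hy
      have hyt : y ∉ t := (List.nodup_cons.mp hnd).1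
      simp [hyt, PySem.Dict.get?_insert_self]
    · rw [PySem.Dict.get?_insert (k' := y) (k := a)]
      by_cases hyt : y ∈ t
      · simp [hyt, hy, List.idxOf_cons_ne _ (by simpa using Ne.symm hy)]
        ring
      · simp [hyt, hy]

-- lookup characterisation of B's setdefault loop: first surviving write wins
lemma firstFold_get? (rest : List (String × Int)) (y : Int) :
    ∀ (s : Int) (d : PySem.Dict Int Int),
      ((PySem.List.enumerate rest s).foldl (fun d ip => d.setdefault ip.2.2 ip.1) d).get? y
        = if d.contains y then d.get? y
          else if y ∈ rest.map Prod.snd then some (s + ((rest.map Prod.snd).idxOf y : Int))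
          else none := by
  induction rest with
  | nil =>
    intro s d
    rw [PySem.List.enumerate_nil]
    simp only [List.foldl_nil, List.map_nil, List.not_mem_nil, if_false]
    by_cases h : d.contains y
    · simp [h]
    · rw [PySem.Dict.contains_eq_isSome_get?] at h
      simp only [Option.isSome_iff_ne_none, ne_eq, not_not] at h
      simp [PySem.Dict.contains_eq_isSome_get?, h]
  | cons hd tl ih =>
    intro s d
    obtain ⟨p, z⟩ := hd
    rw [PySem.List.enumerate_cons]
    simp only [List.foldl_cons, List.map_cons]
    rw [ih (s + 1) (d.setdefault z s)]
    by_cases hy : y = z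
    · subst hy
      rw [PySem.Dict.contains_setdefault]
      simp only [BEq.rfl, Bool.true_or, if_true, PySem.Dict.get?_setdefault_self,
        List.mem_cons, true_or, if_true, List.idxOf_cons_self]
      by_cases hc : d.contains y
      · have hs : (d.get? y).isSome := by
          rw [← PySem.Dict.contains_eq_isSome_get?]; exact hc
        obtain ⟨v, hv⟩ := Option.isSome_iff_exists.mp hs
        simp [hc, hv]
      · have hn : d.get? y = none := by
          rw [PySem.Dict.contains_eq_isSome_get?] at hc
          simpa using hc
        simp [hc, hn]
    · rw [PySem.Dict.contains_setdefault, PySem.Dict.get?_setdefault_of_ne _ _ hy]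
      have hbeq : (y == z) = false := by simpa using hy
      rw [hbeq, Bool.false_or]
      by_cases hc : d.contains y
      · simp [hc]
      · simp only [hc, List.mem_cons, hy, false_or]
        by_cases hyt : y ∈ tl.map Prod.snd
        · rw [List.idxOf_cons_ne _ (by simpa using Ne.symm hy)]
          simp [hyt]
          ring
        · simp [hyt]

-- keys of B's setdefault loop: first occurrences, in order
lemma firstFold_keys (rest : List (String × Int)) :
    ∀ (s : Int) (d : PySem.Dict Int Int),
      ((PySem.List.enumerate rest s).foldl (fun d ip => d.setdefault ip.2.2 ip.1) d).keys
        = PySem.Set.update d.keys (rest.map Prod.snd) := by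
  induction rest with
  | nil => intro s d; simp [PySem.List.enumerate_nil, PySem.Set.update_nil]
  | cons hd tl ih =>
    intro s d
    obtain ⟨p, z⟩ := hd
    rw [PySem.List.enumerate_cons]
    simp only [List.foldl_cons, List.map_cons]
    rw [ih (s + 1) (d.setdefault z s), PySem.Set.update_cons]
    congr 1
    by_cases hc : d.contains z
    · rw [PySem.Dict.setdefault_of_contains _ _ hc, PySem.Set.add_of_mem]
      exact (PySem.Dict.contains_iff_mem_keys _ _).mp hc
    · rw [PySem.Dict.setdefault_of_not_contains _ _ (by simpa using hc),
        PySem.Dict.keys_insert_of_not_contains, PySem.Set.add_of_not_mem]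
      · intro hmem
        exact hc ((PySem.Dict.contains_iff_mem_keys _ _).mpr hmem)
      · simpa using hc
  
-- first-occurrence indices, listed in first-occurrence order, strictly increase
lemma pairwise_idxOf_ofList (l : List Int) :
    (PySem.Set.ofList l).Pairwise (fun a b => l.idxOf a < l.idxOf b) := by
  induction l using List.reverseRecOn with
  | nil => simp [PySem.Set.ofList]
  | append_singleton t x ih =>
    have hof : PySem.Set.ofList (t ++ [x]) = PySem.Set.add (PySem.Set.ofList t) x := by
      rw [PySem.Set.ofList_eq_foldl, PySem.Set.ofList_eq_foldl, List.foldl_append]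
      rfl
    rw [hof, PySem.Set.add_eq_ite]
    have hidx : ∀ a ∈ PySem.Set.ofList t, (t ++ [x]).idxOf a = t.idxOf a := by
      intro a ha
      exact List.idxOf_append_of_mem ((PySem.Set.mem_ofList _ _).mp ha)
    split
    · exact ih.imp_of_mem (fun {a b} ha hb h => by rw [hidx a ha, hidx b hb]; exact h)
    · rename_i hx
      rw [List.pairwise_append]
      refine ⟨ih.imp_of_mem (fun {a b} ha hb h => by rw [hidx a ha, hidx b hb]; exact h),
        by simp, ?_⟩
      intro a ha b hb
      simp only [List.mem_singleton] at hb
      subst hb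
      have hxm : b ∉ t := by
        intro h; exact hx ((PySem.Set.mem_ofList _ _).mpr h)
      rw [hidx a ha, idxOf_append_self t b hxm]
      exact List.idxOf_lt_length_of_mem ((PySem.Set.mem_ofList _ _).mp ha)

-- idxOf commutes with map for a function injective on the list
lemma idxOf_map (ds : List Int) (f : Int → Int) (y : Int) (hy : y ∈ ds)
    (hinj : ∀ a ∈ ds, f a = f y → a = y) :
    (ds.map f).idxOf (f y) = ds.idxOf y := by
  induction ds with
  | nil => cases hy
  | cons a t ih =>
    by_cases h : y = a
    · subst h; simp
    · have hfa : f a ≠ f y := fun he =>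
        h ((hinj a (List.mem_cons_self) he).symm ▸ rfl)
      rw [List.map_cons, List.idxOf_cons_ne _ (by simpa using hfa),
        List.idxOf_cons_ne _ (by simpa using Ne.symm h),
        ih (by cases List.mem_cons.mp hy with
              | inl h' => exact absurd h' h
              | inr h' => exact h')
           (fun b hb => hinj b (List.mem_cons_of_mem _ hb))]

-- B's full characterisation: same closed form as A's loop
lemma alt_characterisation (samples : List (String × Int)) :
    remap_subset_py_alt samples
      = (samples.map (fun py =>
            (py.1, ((PySem.Set.ofList (samples.map Prod.snd)).idxOf py.2 : Int))),
         ((PySem.Set.ofList (samples.map Prod.snd)).length : Int)) := by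
  set labels := samples.map Prod.snd with hlab
  set ds := PySem.Set.ofList labels with hds
  have hget : ∀ y, (firstOcc samples).get? y
      = if y ∈ labels then some ((labels.idxOf y : Int)) else none := by
    intro y
    unfold firstOcc
    rw [firstFold_get? samples y 0 PySem.Dict.empty, hlab]
    simp [PySem.Dict.contains_eq_isSome_get?, PySem.Dict.get?_empty]
  have hkeys : (firstOcc samples).keys = ds := by
    unfold firstOcc
    rw [firstFold_keys samples 0 PySem.Dict.empty, hds, hlab]
    simp [PySem.Dict.keys_empty, PySem.Set.update_nil_left]
  have hknd : (firstOcc samples).keys.Nodup := by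
    rw [hkeys]; exact PySem.Set.nodup_ofList _
  have hvals : (firstOcc samples).values = ds.map (fun y => (labels.idxOf y : Int)) := by
    rw [PySem.Dict.values_eq_map_keys _ hknd 0, hkeys]
    apply List.map_congr_left
    intro y hyds
    have hyl : y ∈ labels := (PySem.Set.mem_ofList _ _).mp hyds
    rw [PySem.Dict.getD_eq_get?_getD, hget y]
    simp [hyl]
  have hpw : ((firstOcc samples).values).Pairwise (fun a b => a < b) := by
    rw [hvals]
    exact (pairwise_idxOf_ofList labels).map _
      (fun a b h => by exact_mod_cast h)
  have hnd : ((firstOcc samples).values).Nodup :=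
    hpw.imp (fun h => ne_of_lt h)
  have hsorted : PySem.List.sorted (firstOcc samples).values (fun x => x) false
      = (firstOcc samples).values :=
    PySem.List.sorted_eq_self_of_pairwise _ _ (hpw.imp (fun h => le_of_lt h))
  have hrget : ∀ v, (mkRanks (firstOcc samples).values).get? v
      = if v ∈ (firstOcc samples).values
          then some (((firstOcc samples).values.idxOf v : Int)) else
          (PySem.Dict.empty : PySem.Dict Int Int).get? v := by
    intro v
    unfold mkRanks
    rw [hsorted, mkRanks_get? _ v 0 PySem.Dict.empty hnd]
    simp
  have hinj : ∀ y ∈ ds, ∀ z ∈ ds,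
      (labels.idxOf y : Int) = (labels.idxOf z : Int) → y = z := by
    intro y hy z hz h
    have hy' : y ∈ labels := (PySem.Set.mem_ofList _ _).mp hy
    have hz' : z ∈ labels := (PySem.Set.mem_ofList _ _).mp hz
    have h' : labels.idxOf y = labels.idxOf z := by exact_mod_cast h
    have e1 : labels[labels.idxOf y]? = some y := by
      rw [List.getElem?_eq_getElem (List.idxOf_lt_length_of_mem hy'),
        List.getElem_idxOf]
    have e2 : labels[labels.idxOf z]? = some z := by
      rw [List.getElem?_eq_getElem (List.idxOf_lt_length_of_mem hz'),
        List.getElem_idxOf]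
    rw [h', e2] at e1
    exact (Option.some_inj.mp e1.symm)
  unfold remap_subset_py_alt
  simp only
  rw [Prod.mk.injEq]
  constructor
  · apply List.map_congr_left
    intro py hpy
    have hyl : py.2 ∈ labels := List.mem_map_of_mem hpy
    have hyds : py.2 ∈ ds := (PySem.Set.mem_ofList _ _).mpr hyl
    have hfd : (firstOcc samples).getD py.2 0 = (labels.idxOf py.2 : Int) := by
      rw [PySem.Dict.getD_eq_get?_getD, hget py.2]; simp [hyl]
    have hmem : (labels.idxOf py.2 : Int) ∈ (firstOcc samples).values := by
      rw [hvals]; exact List.mem_map_of_mem hyds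
    rw [hfd, PySem.Dict.getD_eq_get?_getD, hrget _]
    simp only [hmem, if_true, Option.getD_some, Prod.mk.injEq, true_and]
    rw [hvals]
    have := idxOf_map ds (fun y => (labels.idxOf y : Int)) py.2 hyds
      (fun a ha h => hinj a ha py.2 hyds h)
    simp only at this
    rw [this]
  · have hrkeys : (mkRanks (firstOcc samples).values).keys
        = (firstOcc samples).values := by
      unfold mkRanks
      rw [hsorted, PySem.Dict.keys_foldl_insert_key]
      simp [PySem.List.map_snd_enumerate, PySem.Dict.keys_empty,
        PySem.Set.update_nil_left, PySem.Set.ofList_eq_self_of_nodup _ hnd]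
    have hsz : (mkRanks (firstOcc samples).values).size
        = (mkRanks (firstOcc samples).values).keys.length := by
      simp [PySem.Dict.size, PySem.Dict.keys]
    rw [hsz, hrkeys, hvals, List.length_map]

-- ===== VERDICT (by name: the statement is the Claim_ definition above) =====
theorem remap_subset_py_spec : Claim_equal_remap_subset_py := by
  intro samples _
  unfold Spec_remap_subset_py remap_subset_py
  have h0 : ∀ z : Int, (PySem.Dict.empty : PySem.Dict Int Int).get? z
      = if z ∈ ([] : List Int) then some ((([] : List Int).idxOf z : Int)) else none := by
    intro z; simp [PySem.Dict.get?_empty]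
  have := remapALoop_spec samples [] PySem.Dict.empty [] h0
  simp only [List.length_nil, Nat.cast_zero] at this
  rw [this, alt_characterisation samples]
  simp [PySem.Set.update_nil_left]
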